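-- pv_equiv track=rewrite | github.com/totolemarto/advent_of_code | 2024/jour_25/main.py | get_number_in_columns
-- ===== SOURCE A (Python) =====
-- def get_number_in_columns(mat :list[str]) -> list[int]:
--     number_line = len(mat)
--     number_columns = len(mat[0])
--     result = [0] *number_columns
--     for j in range(number_columns):
--         tot = 0
--         for i in range(number_line):
--             if mat[i][j] == "#":
--                 tot+= 1
--         result[j] = tot
--     return result
-- ===== SOURCE B (Python) =====
-- def get_number_in_columns(mat: list[str]) -> list[int]:
--     result = [0] * len(mat[0])
--     for row in mat:
--         result = [c + (ch == "#") for c, ch in zip(result, row)]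
--     return result
-- ===== Notes on version B (the rewrite author's own statement) =====
-- stated objective: alternative
-- what changed: B replaces A's column-major nested index loops (a scalar tot per column, written into a preallocated list) by a single row-major pass that rebuilds the whole count vector with a zip comprehension per row.
import Mathlib
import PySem

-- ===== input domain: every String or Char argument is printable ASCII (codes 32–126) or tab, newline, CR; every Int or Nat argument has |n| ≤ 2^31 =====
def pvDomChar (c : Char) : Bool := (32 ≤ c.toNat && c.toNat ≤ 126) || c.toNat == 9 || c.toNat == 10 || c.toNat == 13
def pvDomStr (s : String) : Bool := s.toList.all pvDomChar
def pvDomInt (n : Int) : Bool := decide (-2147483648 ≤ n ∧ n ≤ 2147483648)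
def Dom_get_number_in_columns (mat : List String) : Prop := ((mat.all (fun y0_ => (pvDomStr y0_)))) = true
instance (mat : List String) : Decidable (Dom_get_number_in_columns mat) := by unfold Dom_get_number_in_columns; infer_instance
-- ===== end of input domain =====

-- B replaces A's column-major nested index loops by a single row-major pass that rebuilds
-- the count vector with a zip per row; same cost, different decomposition (objective: alternative).

-- ===== PORT A =====
-- A indexes mat[i][j]; inside Pre_ every index is in range, so getD defaults are never read.
def get_number_in_columns (mat : List String) : List Int :=
  let number_line := mat.length
  let number_columns := (mat.getD 0 "").toList.length
  (List.range number_columns).foldl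
    (fun result j =>
      result.set j ((List.range number_line).foldl
        (fun tot i => if (mat.getD i "").toList.getD j ' ' = '#' then tot + 1 else tot) 0))
    (List.replicate number_columns 0)

-- ===== PORT B =====
def get_number_in_columns_alt (mat : List String) : List Int :=
  mat.foldl
    (fun result row =>
      (result.zip row.toList).map (fun p => p.1 + (if p.2 = '#' then (1 : Int) else 0)))
    (List.replicate ((mat.getD 0 "").toList.length) 0)

-- ===== PRECONDITION & SPEC =====
-- Pre_ excludes exactly the inputs on which the Python A raises IndexError:
-- empty mat (mat[0]) and matrices with a row shorter than the first row (mat[i][j]).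
def Pre_get_number_in_columns (mat : List String) : Prop :=
  mat ≠ [] ∧ ∀ s ∈ mat, (mat.getD 0 "").toList.length ≤ s.toList.length
instance (mat : List String) : Decidable (Pre_get_number_in_columns mat) := by
  unfold Pre_get_number_in_columns; infer_instance

def pvWitness_get_number_in_columns : List String := ["#.#", "###"]

def Spec_get_number_in_columns (mat : List String) (out : List Int) : Prop := out = get_number_in_columns_alt mat
instance (mat : List String) (out : List Int) : Decidable (Spec_get_number_in_columns mat out) := by unfold Spec_get_number_in_columns; infer_instance

-- ===== CLAIM (what is proved, stated in full; the proofs are below) =====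
def Claim_equal_get_number_in_columns : Prop := ∀ (mat : List String), Dom_get_number_in_columns mat → Pre_get_number_in_columns mat → Spec_get_number_in_columns mat (get_number_in_columns mat)

-- ===== LEMMAS AND PROOFS =====

-- A's inner loop over row indices counts '#' in column j of the processed rows.
theorem pv_inner_count (j : Nat) :
    ∀ (l : List String) (a : Int),
      (List.range l.length).foldl
        (fun tot i => if (l.getD i "").toList.getD j ' ' = '#' then tot + 1 else tot) a
      = a + (l.countP (fun row => row.toList.getD j ' ' = '#') : Int) := by
  intro l
  induction l with
  | nil => intro a; simp
  | cons r rs ih =>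
      intro a
      rw [List.length_cons, List.range_succ_eq_map]
      simp only [List.foldl_cons, List.foldl_map, List.getD_cons_zero, List.getD_cons_succ]
      rw [ih]
      rw [List.countP_cons]
      split_ifs with h <;> simp_all <;> push_cast <;> ring

-- A's outer loop: writing g j into slot j for each j in range' k m fills the suffix with map g.
theorem pv_setfold (g : Nat → Int) :
    ∀ (m k : Nat) (res : List Int), k + m = res.length →
      (List.range' k m).foldl (fun r j => r.set j (g j)) res
      = res.take k ++ (List.range' k m).map g := by
  intro m
  induction m with
  | zero =>
      intro k res h
      simp [List.range', List.take_of_length_le (by omega : res.length ≤ k)]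
  | succ m ih =>
      intro k res h
      rw [List.range'_succ, List.foldl_cons, List.map_cons]
      rw [ih (k + 1) (res.set k (g k)) (by simp; omega)]
      have hk : k < res.length := by omega
      have htake : (res.set k (g k)).take (k + 1) = res.take k ++ [g k] := by
        rw [List.set_eq_take_append_cons_drop, if_pos hk, List.take_append]
        simp [List.take_take, List.length_take, Nat.min_eq_left hk.le]
      rw [htake, List.append_assoc]
      simp

-- A's outer loop over List.range, from a full initial vector.
theorem pv_setfold0 (g : Nat → Int) (n : Nat) (res : List Int) (h : n = res.length) :
    (List.range n).foldl (fun r j => r.set j (g j)) res = (List.range n).map g := by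
  rw [List.range_eq_range', pv_setfold g n 0 res (by omega)]
  simp

-- B's per-row step, on a vector presented as a map over range.
theorem pv_zipstep (g : Nat → Int) (l : List Char) (nc : Nat) (h : nc ≤ l.length) :
    (((List.range nc).map g).zip l).map (fun p => p.1 + (if p.2 = '#' then (1 : Int) else 0))
    = (List.range nc).map (fun j => g j + (if l.getD j ' ' = '#' then (1 : Int) else 0)) := by
  apply List.ext_getElem
  · simp [Nat.min_eq_left h]
  · intro i h1 h2
    have hi : i < nc := by simpa using h2
    have hil : i < l.length := lt_of_lt_of_le hi h
    simp [List.getElem_zip, List.getD_eq_getElem?_getD, List.getElem?_eq_getElem hil]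

-- B's fold over the rows accumulates the per-column counts.
theorem pv_rowfold :
    ∀ (rows : List String) (nc : Nat) (g : Nat → Int),
      (∀ r ∈ rows, nc ≤ r.toList.length) →
      rows.foldl
        (fun result row =>
          (result.zip row.toList).map (fun p => p.1 + (if p.2 = '#' then (1 : Int) else 0)))
        ((List.range nc).map g)
      = (List.range nc).map
          (fun j => g j + (rows.countP (fun row => row.toList.getD j ' ' = '#') : Int)) := by
  intro rows
  induction rows with
  | nil => intro nc g _; simp
  | cons r rs ih =>
      intro nc g h
      rw [List.foldl_cons, pv_zipstep g r.toList nc (h r (by simp))]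
      rw [ih nc _ (fun s hs => h s (by simp [hs]))]
      apply List.map_congr_left
      intro j _
      rw [List.countP_cons]
      split_ifs with hj <;> simp_all <;> push_cast <;> ring

-- ===== VERDICT (by name: the statement is the Claim_ definition above) =====
theorem get_number_in_columns_spec : Claim_equal_get_number_in_columns := by
  intro mat _ hpre
  unfold Spec_get_number_in_columns get_number_in_columns get_number_in_columns_alt
  dsimp only
  set nc := (mat.getD 0 "").toList.length with hnc
  have hrep : List.replicate nc (0 : Int) = (List.range nc).map (fun _ => (0 : Int)) := by
    simp [List.map_const']
  rw [hrep, pv_setfold0 _ nc _ (by simp),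
      pv_rowfold mat nc (fun _ => (0 : Int)) hpre.2]
  apply List.map_congr_left
  intro j _
  rw [pv_inner_count j mat 0]
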